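-- pv_equiv track=rewrite | github.com/piercecunneen/malicious_url_detection | features.py | count_case_changes
-- ===== SOURCE A (Python) =====
-- def count_case_changes(s):
--     changes = 0
--     lower = False
--     for i in s:
--         if i.isupper() and lower:
--             lower = False
--             changes += 1
--         elif i.islower() and not lower:
--             lower = True
--             changes += 1
--     return changes
-- ===== SOURCE B (Python) =====
-- def count_case_changes(s):
--     t = ''.join('l' if c.islower() else 'u' if c.isupper() else '' for c in s)
--     return t.count('lu') + t.count('ul') + (1 if t.startswith('l') else 0)
-- ===== Notes on version B (the rewrite author's own statement) =====
-- stated objective: alternative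
-- what changed: Instead of a single stateful flag loop, B first canonicalizes the string into a marker string of its letters' cases and then obtains the answer by substring counting of the two adjacent case-change patterns plus one if the marker string begins with a lowercase marker (the virtual uppercase start).
import Mathlib
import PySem

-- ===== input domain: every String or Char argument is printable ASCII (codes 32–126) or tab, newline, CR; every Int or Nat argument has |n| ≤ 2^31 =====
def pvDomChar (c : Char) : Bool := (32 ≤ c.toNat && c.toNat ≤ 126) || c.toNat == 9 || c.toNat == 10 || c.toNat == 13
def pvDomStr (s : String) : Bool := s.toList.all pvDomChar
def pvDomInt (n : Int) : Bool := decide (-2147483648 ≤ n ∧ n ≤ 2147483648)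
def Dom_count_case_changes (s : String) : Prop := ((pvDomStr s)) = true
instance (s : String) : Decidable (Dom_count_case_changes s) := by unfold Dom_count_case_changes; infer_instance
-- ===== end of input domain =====

-- B replaces A's stateful flag loop by a different algorithm: canonicalize the letters
-- into a case-marker string, then count the two adjacent change patterns as substrings
-- and add one if the marker string begins with a lowercase marker; objective: alternative.
-- ===== PORT A =====
def count_case_changes (s : String) : Int :=
  (s.toList.foldl
    (fun st i =>
      if PySem.Chars.isupper i && st.2 then (st.1 + 1, false)
      else if PySem.Chars.islower i && !st.2 then (st.1 + 1, true)
      else st)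
    ((0 : Int), false)).1

-- ===== PORT B =====
def count_case_changes_alt (s : String) : Int :=
  let t := s.toList.flatMap
    (fun c => if PySem.Chars.islower c then ['l']
              else if PySem.Chars.isupper c then ['u'] else [])
  (PySem.Chars.count t ['l', 'u'] : Int) + (PySem.Chars.count t ['u', 'l'] : Int) +
    (if PySem.Chars.startswith t ['l'] then 1 else 0)

-- ===== PRECONDITION & SPEC =====
def Spec_count_case_changes (s : String) (out : Int) : Prop := out = count_case_changes_alt s
instance (s : String) (out : Int) : Decidable (Spec_count_case_changes s out) := by unfold Spec_count_case_changes; infer_instance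

-- ===== CLAIM (what is proved, stated in full; the proofs are below) =====
def Claim_equal_count_case_changes : Prop := ∀ (s : String), Dom_count_case_changes s → Spec_count_case_changes s (count_case_changes s)

-- ===== LEMMAS AND PROOFS =====

-- number of adjacent pairs (x, y) in a char list
def pvAdj (x y : Char) : List Char → Nat
  | a :: b :: r => (if a = x ∧ b = y then 1 else 0) + pvAdj x y (b :: r)
  | _ => 0

-- seeded adjacent-disagreement count of a Bool list (characterises A's loop)
def pvPairCount : Bool → List Bool → Int
  | _, [] => 0
  | prev, b :: bs => (if prev != b then 1 else 0) + pvPairCount b bs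

-- the case markers of the letters of l (True = lowercase)
def pvCaseList (l : List Char) : List Bool :=
  (l.filter (fun c => PySem.Chars.islower c || PySem.Chars.isupper c)).map PySem.Chars.islower

def pvCharOf (b : Bool) : Char := if b then 'l' else 'u'

theorem pvLowerNotUpper (x : Char) (h : PySem.Chars.islower x = true) :
    PySem.Chars.isupper x = false := by
  simp only [PySem.Chars.islower, Bool.and_eq_true, decide_eq_true_eq] at h
  simp only [PySem.Chars.isupper, Bool.and_eq_false_iff, decide_eq_false_iff_not, not_le]
  right
  calc ('Z' : Char) < 'a' := by decide
    _ ≤ x := h.1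

-- A's fold computes the seeded disagreement count of the marker list
theorem pvFoldA (l : List Char) (st : Int × Bool) :
    (l.foldl
      (fun st i =>
        if PySem.Chars.isupper i && st.2 then (st.1 + 1, false)
        else if PySem.Chars.islower i && !st.2 then (st.1 + 1, true)
        else st)
      st).1 = st.1 + pvPairCount st.2 (pvCaseList l) := by
  induction l generalizing st with
  | nil => simp [pvCaseList, pvPairCount]
  | cons x l ih =>
    rw [List.foldl_cons, ih]
    obtain ⟨c, b⟩ := st
    by_cases hu : PySem.Chars.isupper x = true
    · have hl : PySem.Chars.islower x = false := by
        cases h : PySem.Chars.islower x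
        · rfl
        · exact absurd hu (by simp [pvLowerNotUpper x h])
      cases b <;> simp [hu, hl, pvCaseList, pvPairCount] <;> omega
    · simp only [Bool.not_eq_true] at hu
      by_cases hl : PySem.Chars.islower x = true
      · cases b <;> simp [hu, hl, pvCaseList, pvPairCount] <;> omega
      · simp only [Bool.not_eq_true] at hl
        simp [hu, hl, pvCaseList]

-- B's marker string is the image of the marker list
theorem pvFlatMapEq (l : List Char) :
    l.flatMap
      (fun c => if PySem.Chars.islower c then ['l']
                else if PySem.Chars.isupper c then ['u'] else [])
      = (pvCaseList l).map pvCharOf := by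
  induction l with
  | nil => simp [pvCaseList]
  | cons x l ih =>
    by_cases hl : PySem.Chars.islower x = true
    · simp [pvCaseList, hl, pvCharOf, ih]
    · simp only [Bool.not_eq_true] at hl
      by_cases hu : PySem.Chars.isupper x = true
      · simp [pvCaseList, hl, hu, pvCharOf, ih]
      · simp only [Bool.not_eq_true] at hu
        simp [pvCaseList, hl, hu, ih]

-- Python's non-overlapping substring count of a two-char pattern with distinct
-- characters equals the adjacent-pair count (a match at i forbids one at i+1)
theorem pvCountGo (x y : Char) (hxy : x ≠ y) :
    ∀ (fuel : Nat) (t : List Char) (acc : Nat), t.length ≤ fuel →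
      PySem.Chars.count.go [x, y] fuel t acc = acc + pvAdj x y t := by
  intro fuel
  induction fuel with
  | zero =>
    intro t acc h
    have : t = [] := List.eq_nil_of_length_eq_zero (Nat.le_zero.mp h)
    subst this
    simp [PySem.Chars.count.go, pvAdj]
  | succ fuel ih =>
    intro t acc h
    match t with
    | [] => simp [PySem.Chars.count.go, pvAdj]
    | a :: rest =>
      rw [PySem.Chars.count.go]
      by_cases hp : List.isPrefixOf [x, y] (a :: rest) = true
      · match rest, hp with
        | [], hp => simp [List.isPrefixOf] at hp
        | b :: r2, hp =>
          simp only [List.isPrefixOf, Bool.and_eq_true, beq_iff_eq] at hp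
          obtain ⟨hax, hby, -⟩ := hp
          subst hax; subst hby
          rw [if_pos (by simp [List.isPrefixOf])]
          simp only [List.length_cons] at h
          have := ih ((x :: y :: r2).drop [x, y].length) (acc + 1)
            (by simp only [List.length_cons, List.length_nil, List.drop_succ_cons,
                  List.drop_zero]; omega)
          simp only [List.length_cons, List.length_nil, List.drop_succ_cons,
            List.drop_zero] at this ⊢
          rw [this]
          -- adjacent counts: (a,b) matches; (b, head r2) cannot since b = y ≠ x
          have hb : pvAdj x y (y :: r2) = pvAdj x y r2 := by
            match r2 with
            | [] => simp [pvAdj]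
            | c :: r3 =>
              simp [pvAdj]
              intro hbx
              exact absurd hbx (Ne.symm hxy)
          simp [pvAdj, hb]
          omega
      · rw [if_neg hp]
        simp only [List.length_cons] at h
        rw [ih rest acc (by omega)]
        have : pvAdj x y (a :: rest) = pvAdj x y rest := by
          match rest with
          | [] => simp [pvAdj]
          | b :: r2 =>
            simp [pvAdj]
            intro hax hby
            exact absurd (by simp [List.isPrefixOf, hax, hby]) hp
        rw [this]

theorem pvCountEq (x y : Char) (hxy : x ≠ y) (t : List Char) :
    PySem.Chars.count t [x, y] = pvAdj x y t := by
  have := pvCountGo x y hxy t.length t 0 (le_refl _)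
  simp [PySem.Chars.count, this]

-- the two adjacent-pair counts of the marker string plus the sentinel transition
-- equal the seeded disagreement count
theorem pvPairSplit (bs : List Bool) (prev : Bool) :
    pvPairCount prev bs =
      (pvAdj 'l' 'u' (bs.map pvCharOf) : Int) + (pvAdj 'u' 'l' (bs.map pvCharOf) : Int) +
        (if bs.head? = some (!prev) then 1 else 0) := by
  induction bs generalizing prev with
  | nil => simp [pvPairCount, pvAdj]
  | cons c rest ih =>
    rw [pvPairCount, ih c]
    match rest with
    | [] =>
      cases c <;> cases prev <;> simp [pvAdj, pvCharOf]
    | d :: r2 =>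
      simp only [List.map_cons, List.head?_cons]
      rw [pvAdj, pvAdj]
      cases c <;> cases d <;> cases prev <;> simp [pvCharOf] <;> omega

-- ===== VERDICT (by name: the statement is the Claim_ definition above) =====
theorem count_case_changes_spec : Claim_equal_count_case_changes := by
  intro s _
  unfold Spec_count_case_changes count_case_changes count_case_changes_alt
  rw [pvFoldA]
  simp only [pvFlatMapEq, pvCountEq 'l' 'u' (by decide), pvCountEq 'u' 'l' (by decide)]
  rw [pvPairSplit (pvCaseList s.toList) false]
  have hsw : PySem.Chars.startswith ((pvCaseList s.toList).map pvCharOf) ['l']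
      = ((pvCaseList s.toList).head? == some true) := by
    match h : pvCaseList s.toList with
    | [] => simp [PySem.Chars.startswith]
    | b :: bs =>
      cases b <;> simp [PySem.Chars.startswith, List.isPrefixOf, pvCharOf]
  rw [hsw]
  by_cases hh : (pvCaseList s.toList).head? = some true <;> simp [hh]
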